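-- pv_equiv track=rewrite | github.com/Fultslop/embedm | src/embedm/formatting.py | _get_inline_styles
-- ===== SOURCE A (Python) =====
-- def _get_inline_styles(theme: str, max_digits: int) -> dict:
--     """Get inline styles for HTML line numbers (GitHub-compatible).
--
--     Args:
--         theme: Theme name ('default', 'dark', 'minimal')
--         max_digits: Number of digits for line numbers (for width calculation)
--
--     Returns:
--         Dict with 'container', 'pre', and 'line_number' inline style strings
--     """
--     styles = {}
--
--     if theme == 'default':
--         styles['container'] = (
--             'background: #f6f8fa; '
--             'border: 1px solid #d0d7de; '
--             'border-radius: 6px; '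
--             'padding: 16px; '
--             'overflow-x: auto; '
--             'font-family: ui-monospace, SFMono-Regular, "SF Mono", Menlo, Consolas, "Liberation Mono", monospace; '
--             'font-size: 12px; '
--             'line-height: 1.5;'
--         )
--         styles['pre'] = 'margin: 0; overflow: visible;'
--         styles['line_number'] = (
--             f'display: inline-block; '
--             f'width: {max_digits}ch; '
--             f'color: #57606a; '
--             f'user-select: none; '
--             f'text-align: right; '
--             f'padding-right: 1em; '
--             f'margin-right: 1em; '
--             f'border-right: 1px solid #d0d7de;'
--         )
--     elif theme == 'dark':
--         styles['container'] = (
--             'background: #0d1117; '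
--             'border: 1px solid #30363d; '
--             'border-radius: 6px; '
--             'padding: 16px; '
--             'overflow-x: auto; '
--             'font-family: ui-monospace, SFMono-Regular, "SF Mono", Menlo, Consolas, "Liberation Mono", monospace; '
--             'font-size: 12px; '
--             'line-height: 1.5; '
--             'color: #c9d1d9;'
--         )
--         styles['pre'] = 'margin: 0; overflow: visible;'
--         styles['line_number'] = (
--             f'display: inline-block; '
--             f'width: {max_digits}ch; '
--             f'color: #8b949e; '
--             f'user-select: none; '
--             f'text-align: right; '
--             f'padding-right: 1em; '
--             f'margin-right: 1em; '
--             f'border-right: 1px solid #30363d;'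
--         )
--     elif theme == 'minimal':
--         styles['container'] = (
--             'border-left: 2px solid #0969da; '
--             'padding-left: 16px; '
--             'overflow-x: auto; '
--             'font-family: ui-monospace, SFMono-Regular, "SF Mono", Menlo, Consolas, "Liberation Mono", monospace; '
--             'font-size: 12px; '
--             'line-height: 1.5;'
--         )
--         styles['pre'] = 'margin: 0; overflow: visible;'
--         styles['line_number'] = (
--             f'display: inline-block; '
--             f'width: {max_digits}ch; '
--             f'color: #656d76; '
--             f'user-select: none; '
--             f'text-align: right; '
--             f'padding-right: 1em; '
--             f'margin-right: 1em;'
--         )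
--     else:
--         # Unknown theme, use default
--         return _get_inline_styles('default', max_digits)
--
--     return styles
-- ===== SOURCE B (Python) =====
-- # Structured rewrite: styles are built as lists of (property, value) CSS
-- # declarations and rendered once by a join, instead of A's hand-written
-- # literal strings per branch.
--
-- _FONT = ('ui-monospace, SFMono-Regular, "SF Mono", Menlo, Consolas, '
--          '"Liberation Mono", monospace')
--
-- _TEXT_BASE = [
--     ('overflow-x', 'auto'),
--     ('font-family', _FONT),
--     ('font-size', '12px'),
--     ('line-height', '1.5'),
-- ]
--
--
-- def _render(props):
--     """Render a declaration list as 'a: b; c: d;' (GitHub-style)."""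
--     return ' '.join(f'{k}: {v};' for k, v in props)
--
--
-- def _get_inline_styles(theme: str, max_digits: int) -> dict:
--     if theme == 'dark':
--         container = [
--             ('background', '#0d1117'),
--             ('border', '1px solid #30363d'),
--             ('border-radius', '6px'),
--             ('padding', '16px'),
--         ] + _TEXT_BASE + [('color', '#c9d1d9')]
--         ln_color, border = '#8b949e', '1px solid #30363d'
--     elif theme == 'minimal':
--         container = [
--             ('border-left', '2px solid #0969da'),
--             ('padding-left', '16px'),
--         ] + _TEXT_BASE
--         ln_color, border = '#656d76', None
--     else:  # 'default' and any unknown theme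
--         container = [
--             ('background', '#f6f8fa'),
--             ('border', '1px solid #d0d7de'),
--             ('border-radius', '6px'),
--             ('padding', '16px'),
--         ] + _TEXT_BASE
--         ln_color, border = '#57606a', '1px solid #d0d7de'
--
--     line_number = [
--         ('display', 'inline-block'),
--         ('width', f'{max_digits}ch'),
--         ('color', ln_color),
--         ('user-select', 'none'),
--         ('text-align', 'right'),
--         ('padding-right', '1em'),
--         ('margin-right', '1em'),
--     ]
--     if border is not None:
--         line_number.append(('border-right', border))
--
--     return {
--         'container': _render(container),
--         'pre': _render([('margin', '0'), ('overflow', 'visible')]),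
--         'line_number': _render(line_number),
--     }
-- ===== Notes on version B (the rewrite author's own statement) =====
-- stated objective: alternative
-- what changed: Instead of A's three branches of hand-written literal style strings (and a recursive fallback for unknown themes), B represents each style as a list of (property, value) CSS declarations built from a shared base list and renders every style string once through a single join-based _render helper; unknown themes fall into the default branch directly.
import Mathlib
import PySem

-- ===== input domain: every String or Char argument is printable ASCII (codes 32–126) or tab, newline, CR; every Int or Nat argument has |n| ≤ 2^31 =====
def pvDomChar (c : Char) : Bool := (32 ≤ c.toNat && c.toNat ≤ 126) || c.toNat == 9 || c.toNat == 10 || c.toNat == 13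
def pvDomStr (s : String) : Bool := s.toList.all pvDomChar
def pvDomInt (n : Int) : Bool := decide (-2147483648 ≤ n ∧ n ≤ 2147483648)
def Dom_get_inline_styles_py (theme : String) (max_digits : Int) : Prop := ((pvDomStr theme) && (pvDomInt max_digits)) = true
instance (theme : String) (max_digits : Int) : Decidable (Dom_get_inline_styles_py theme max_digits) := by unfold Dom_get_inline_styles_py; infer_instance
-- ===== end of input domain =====

-- B builds each style as a list of (property, value) declarations rendered by a join,
-- replacing A's per-theme literal strings and recursive fallback; return values proved equal.

-- ===== PORT A =====
-- literal transliteration of _get_inline_styles: dict built by three insertions per branch,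
-- unknown theme recurses with 'default' (terminates: 'default' hits the first branch).
def get_inline_styles_py (theme : String) (max_digits : Int) : List (String × String) :=
  if theme = "default" then
    ((((PySem.Dict.empty : PySem.Dict String String).insert "container"
        "background: #f6f8fa; border: 1px solid #d0d7de; border-radius: 6px; padding: 16px; overflow-x: auto; font-family: ui-monospace, SFMono-Regular, \"SF Mono\", Menlo, Consolas, \"Liberation Mono\", monospace; font-size: 12px; line-height: 1.5;").insert
        "pre" "margin: 0; overflow: visible;").insert "line_number"
        ("display: inline-block; width: " ++ PySem.Int.toStr max_digits ++
         "ch; color: #57606a; user-select: none; text-align: right; padding-right: 1em; margin-right: 1em; border-right: 1px solid #d0d7de;")).items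
  else if theme = "dark" then
    ((((PySem.Dict.empty : PySem.Dict String String).insert "container"
        "background: #0d1117; border: 1px solid #30363d; border-radius: 6px; padding: 16px; overflow-x: auto; font-family: ui-monospace, SFMono-Regular, \"SF Mono\", Menlo, Consolas, \"Liberation Mono\", monospace; font-size: 12px; line-height: 1.5; color: #c9d1d9;").insert
        "pre" "margin: 0; overflow: visible;").insert "line_number"
        ("display: inline-block; width: " ++ PySem.Int.toStr max_digits ++
         "ch; color: #8b949e; user-select: none; text-align: right; padding-right: 1em; margin-right: 1em; border-right: 1px solid #30363d;")).items
  else if theme = "minimal" then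
    ((((PySem.Dict.empty : PySem.Dict String String).insert "container"
        "border-left: 2px solid #0969da; padding-left: 16px; overflow-x: auto; font-family: ui-monospace, SFMono-Regular, \"SF Mono\", Menlo, Consolas, \"Liberation Mono\", monospace; font-size: 12px; line-height: 1.5;").insert
        "pre" "margin: 0; overflow: visible;").insert "line_number"
        ("display: inline-block; width: " ++ PySem.Int.toStr max_digits ++
         "ch; color: #656d76; user-select: none; text-align: right; padding-right: 1em; margin-right: 1em;")).items
  else
    get_inline_styles_py "default" max_digits
termination_by (if theme = "default" then 0 else 1)
decreasing_by simp_all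

-- ===== PORT B =====
-- B-side helpers: declaration lists and the join-based renderer (port of Source B's _render)
def pvFont : String :=
  "ui-monospace, SFMono-Regular, \"SF Mono\", Menlo, Consolas, \"Liberation Mono\", monospace"

def pvTextBase : List (String × String) :=
  [("overflow-x", "auto"), ("font-family", pvFont), ("font-size", "12px"), ("line-height", "1.5")]

-- ' '.join(f'{k}: {v};' for k, v in props)
def pvRender (props : List (String × String)) : String :=
  PySem.Str.join " " (props.map fun kv => kv.1 ++ ": " ++ kv.2 ++ ";")

def get_inline_styles_py_alt (theme : String) (max_digits : Int) : List (String × String) :=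
  let row :=
    if theme = "dark" then
      ([("background", "#0d1117"), ("border", "1px solid #30363d"),
        ("border-radius", "6px"), ("padding", "16px")] ++ pvTextBase ++ [("color", "#c9d1d9")],
       "#8b949e", some "1px solid #30363d")
    else if theme = "minimal" then
      ([("border-left", "2px solid #0969da"), ("padding-left", "16px")] ++ pvTextBase,
       "#656d76", (none : Option String))
    else
      ([("background", "#f6f8fa"), ("border", "1px solid #d0d7de"),
        ("border-radius", "6px"), ("padding", "16px")] ++ pvTextBase,
       "#57606a", some "1px solid #d0d7de")
  let container := row.1
  let ln_color := row.2.1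
  let border := row.2.2
  let line_number :=
    [("display", "inline-block"), ("width", PySem.Int.toStr max_digits ++ "ch"),
     ("color", ln_color), ("user-select", "none"), ("text-align", "right"),
     ("padding-right", "1em"), ("margin-right", "1em")] ++
    (match border with | some b => [("border-right", b)] | none => [])
  [("container", pvRender container),
   ("pre", pvRender [("margin", "0"), ("overflow", "visible")]),
   ("line_number", pvRender line_number)]

-- ===== PRECONDITION & SPEC =====
def Spec_get_inline_styles_py (theme : String) (max_digits : Int) (out : List (String × String)) : Prop := out = get_inline_styles_py_alt theme max_digits
instance (theme : String) (max_digits : Int) (out : List (String × String)) : Decidable (Spec_get_inline_styles_py theme max_digits out) := by unfold Spec_get_inline_styles_py; infer_instance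

-- ===== CLAIM (what is proved, stated in full; the proofs are below) =====
def Claim_equal_get_inline_styles_py : Prop := ∀ (theme : String) (max_digits : Int), Dom_get_inline_styles_py theme max_digits → Spec_get_inline_styles_py theme max_digits (get_inline_styles_py theme max_digits)

-- ===== LEMMAS AND PROOFS =====

-- ===== VERDICT (by name: the statement is the Claim_ definition above) =====
theorem get_inline_styles_py_spec : Claim_equal_get_inline_styles_py := by
  intro theme max_digits _
  unfold Spec_get_inline_styles_py get_inline_styles_py get_inline_styles_py_alt
  by_cases h1 : theme = "default"
  · subst h1
    simp [PySem.Dict.insert, PySem.Dict.empty]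
    and_intros <;>
      (apply String.toList_injective
       simp [pvRender, pvTextBase, pvFont, PySem.Str.join, PySem.Chars.join,
         PySem.Int.toList_toStr, List.intercalate, List.intersperse])
  · by_cases h2 : theme = "dark"
    · subst h2
      simp [PySem.Dict.insert, PySem.Dict.empty]
      and_intros <;>
        (apply String.toList_injective
         simp [pvRender, pvTextBase, pvFont, PySem.Str.join, PySem.Chars.join,
           PySem.Int.toList_toStr, List.intercalate, List.intersperse])
    · by_cases h3 : theme = "minimal"
      · subst h3
        simp [PySem.Dict.insert, PySem.Dict.empty]
        and_intros <;>
          (apply String.toList_injective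
           simp [pvRender, pvTextBase, pvFont, PySem.Str.join, PySem.Chars.join,
             PySem.Int.toList_toStr, List.intercalate, List.intersperse])
      · simp only [if_neg h1, if_neg h2, if_neg h3]
        rw [get_inline_styles_py]
        simp only [reduceIte]
        simp [PySem.Dict.insert, PySem.Dict.empty]
        and_intros <;>
          (apply String.toList_injective
           simp [pvRender, pvTextBase, pvFont, PySem.Str.join, PySem.Chars.join,
             PySem.Int.toList_toStr, List.intercalate, List.intersperse])
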